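-- pv_equiv track=rewrite | github.com/junior-jl/learning-python | data-structures-and-algorithms/exercises/highs_and_lows.py | count_low_high
-- ===== SOURCE A (Python) =====
-- def count_low_high(num_list):
--     if len(num_list) == 0:
--         return None
--     else: # This else is useless.
--         low = 0
--         high = 0
--         for num in num_list:
--             if num % 3 == 0 or num > 50:
--                 high += 1
--             else:
--                 low += 1
--     return [low, high]
-- ===== SOURCE B (Python) =====
-- def count_low_high(num_list):
--     if len(num_list) == 0:
--         return None
--     low, high = _count_pair(num_list)
--     return [low, high]
--
-- def _count_pair(xs):
--     # divide and conquer: count (low, high) in each half and add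
--     if len(xs) <= 1:
--         if not xs:
--             return (0, 0)
--         return (0, 1) if xs[0] % 3 == 0 or xs[0] > 50 else (1, 0)
--     mid = len(xs) // 2
--     l1, h1 = _count_pair(xs[:mid])
--     l2, h2 = _count_pair(xs[mid:])
--     return (l1 + l2, h1 + h2)
-- ===== Notes on version B (the rewrite author's own statement) =====
-- stated objective: alternative
-- what changed: B replaces A's single-pass pair of running counters with a divide-and-conquer recursion: it splits the list in halves, counts (low, high) in each half and adds the pairs.
import Mathlib
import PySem

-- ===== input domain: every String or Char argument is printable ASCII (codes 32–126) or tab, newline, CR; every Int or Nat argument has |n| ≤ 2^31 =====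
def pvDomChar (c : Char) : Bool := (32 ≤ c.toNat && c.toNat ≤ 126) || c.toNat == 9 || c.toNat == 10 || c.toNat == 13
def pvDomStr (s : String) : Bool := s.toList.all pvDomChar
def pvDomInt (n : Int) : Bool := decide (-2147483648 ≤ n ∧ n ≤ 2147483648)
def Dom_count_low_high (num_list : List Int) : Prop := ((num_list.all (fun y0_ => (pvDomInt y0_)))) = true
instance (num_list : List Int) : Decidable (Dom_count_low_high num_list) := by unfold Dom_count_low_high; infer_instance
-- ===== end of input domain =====

-- B replaces A's single pass with two running counters by a divide-and-conquer
-- recursion that splits the list in halves, counts each half and adds the pairs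
-- (objective: alternative, same result, genuinely different traversal).

-- ===== PORT A =====
def count_low_high (num_list : List Int) : Option (List Int) :=
  if num_list.length = 0 then none
  else
    let (low, high) := num_list.foldl
      (fun (s : Int × Int) num =>
        if PySem.Int.mod num 3 = 0 ∨ num > 50 then (s.1, s.2 + 1) else (s.1 + 1, s.2))
      (0, 0)
    some [low, high]

-- ===== PORT B =====
-- _count_pair: xs[:mid] / xs[mid:] with 0 ≤ mid ≤ len(xs) are exactly take/drop.
def pvCountPair (xs : List Int) : Int × Int :=
  if xs.length ≤ 1 then
    match xs with
    | [] => (0, 0)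
    | x :: _ => if PySem.Int.mod x 3 = 0 ∨ x > 50 then (0, 1) else (1, 0)
  else
    let mid := xs.length / 2
    let p1 := pvCountPair (xs.take mid)
    let p2 := pvCountPair (xs.drop mid)
    (p1.1 + p2.1, p1.2 + p2.2)
termination_by xs.length
decreasing_by
  · simp [List.length_take]; omega
  · simp [List.length_drop]; omega

def count_low_high_alt (num_list : List Int) : Option (List Int) :=
  if num_list.length = 0 then none
  else
    let p := pvCountPair num_list
    some [p.1, p.2]

-- ===== PRECONDITION & SPEC =====
def Spec_count_low_high (num_list : List Int) (out : Option (List Int)) : Prop := out = count_low_high_alt num_list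
instance (num_list : List Int) (out : Option (List Int)) : Decidable (Spec_count_low_high num_list out) := by unfold Spec_count_low_high; infer_instance

-- ===== CLAIM (what is proved, stated in full; the proofs are below) =====
def Claim_equal_count_low_high : Prop := ∀ (num_list : List Int), Dom_count_low_high num_list → Spec_count_low_high num_list (count_low_high num_list)

-- ===== LEMMAS AND PROOFS =====

-- reference counts: number of 'high' and 'low' elements, as filter lengths
def pvHi (xs : List Int) : Int :=
  ((xs.filter (fun x => decide (PySem.Int.mod x 3 = 0 ∨ x > 50))).length : Int)
def pvLo (xs : List Int) : Int :=
  ((xs.filter (fun x => !decide (PySem.Int.mod x 3 = 0 ∨ x > 50))).length : Int)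

theorem pvHi_append (a b : List Int) : pvHi (a ++ b) = pvHi a + pvHi b := by
  simp only [pvHi, List.filter_append, List.length_append]; push_cast; ring

theorem pvLo_append (a b : List Int) : pvLo (a ++ b) = pvLo a + pvLo b := by
  simp only [pvLo, List.filter_append, List.length_append]; push_cast; ring

theorem pvHi_cons_hi (x : Int) (t : List Int) (hx : PySem.Int.mod x 3 = 0 ∨ x > 50) :
    pvHi (x :: t) = pvHi t + 1 := by
  have hd := decide_eq_true hx
  simp only [pvHi, List.filter_cons, hd, if_true, List.length_cons]; push_cast; ring

theorem pvLo_cons_hi (x : Int) (t : List Int) (hx : PySem.Int.mod x 3 = 0 ∨ x > 50) :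
    pvLo (x :: t) = pvLo t := by
  have hd := decide_eq_true hx
  simp only [pvLo, List.filter_cons, hd, Bool.not_true, Bool.false_eq_true, if_false]

theorem pvHi_cons_lo (x : Int) (t : List Int) (hx : ¬ (PySem.Int.mod x 3 = 0 ∨ x > 50)) :
    pvHi (x :: t) = pvHi t := by
  have hd := decide_eq_false hx
  simp only [pvHi, List.filter_cons, hd, Bool.false_eq_true, if_false]

theorem pvLo_cons_lo (x : Int) (t : List Int) (hx : ¬ (PySem.Int.mod x 3 = 0 ∨ x > 50)) :
    pvLo (x :: t) = pvLo t + 1 := by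
  have hd := decide_eq_false hx
  simp only [pvLo, List.filter_cons, hd, Bool.not_false, if_true, List.length_cons]
  push_cast; ring

-- B's divide-and-conquer pair equals the two category counts
theorem pvCountPair_eq_aux (n : Nat) : ∀ (xs : List Int), xs.length ≤ n →
    pvCountPair xs = (pvLo xs, pvHi xs) := by
  induction n with
  | zero =>
    intro xs hlen
    have hx : xs = [] := List.eq_nil_of_length_eq_zero (Nat.le_zero.mp hlen)
    subst hx
    simp [pvCountPair, pvLo, pvHi]
  | succ n ih =>
    intro xs hlen
    unfold pvCountPair
    by_cases h1 : xs.length ≤ 1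
    · rw [if_pos h1]
      match xs, h1 with
      | [], _ => simp [pvLo, pvHi]
      | [x], _ =>
        show (if PySem.Int.mod x 3 = 0 ∨ x > 50 then ((0 : Int), (1 : Int))
              else ((1 : Int), (0 : Int))) = (pvLo [x], pvHi [x])
        by_cases hx : PySem.Int.mod x 3 = 0 ∨ x > 50
        · rw [if_pos hx, pvHi_cons_hi x [] hx, pvLo_cons_hi x [] hx]
          simp [pvLo, pvHi]
        · rw [if_neg hx, pvHi_cons_lo x [] hx, pvLo_cons_lo x [] hx]
          simp [pvLo, pvHi]
    · rw [if_neg h1]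
      have ht : (xs.take (xs.length / 2)).length ≤ n := by
        simp only [List.length_take]; omega
      have hd : (xs.drop (xs.length / 2)).length ≤ n := by
        simp only [List.length_drop]; omega
      show ((pvCountPair (xs.take (xs.length / 2))).1 + (pvCountPair (xs.drop (xs.length / 2))).1,
            (pvCountPair (xs.take (xs.length / 2))).2 + (pvCountPair (xs.drop (xs.length / 2))).2)
            = (pvLo xs, pvHi xs)
      rw [ih _ ht, ih _ hd]
      have hsplit := List.take_append_drop (xs.length / 2) xs
      conv_rhs => rw [← hsplit]
      rw [pvLo_append, pvHi_append]

theorem pvCountPair_eq (xs : List Int) : pvCountPair xs = (pvLo xs, pvHi xs) :=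
  pvCountPair_eq_aux xs.length xs le_rfl

-- A's pair fold equals the two category counts
theorem fold_pair_eq (xs : List Int) (l0 h0 : Int) :
    xs.foldl
      (fun (s : Int × Int) num =>
        if PySem.Int.mod num 3 = 0 ∨ num > 50 then (s.1, s.2 + 1) else (s.1 + 1, s.2))
      (l0, h0) = (l0 + pvLo xs, h0 + pvHi xs) := by
  induction xs generalizing l0 h0 with
  | nil => simp [pvLo, pvHi]
  | cons x t ih =>
    simp only [List.foldl_cons]
    by_cases hx : PySem.Int.mod x 3 = 0 ∨ x > 50
    · rw [if_pos hx, ih, pvLo_cons_hi x t hx, pvHi_cons_hi x t hx]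
      refine Prod.ext rfl ?_
      simp only
      ring
    · rw [if_neg hx, ih, pvLo_cons_lo x t hx, pvHi_cons_lo x t hx]
      refine Prod.ext ?_ rfl
      simp only
      ring

-- ===== VERDICT (by name: the statement is the Claim_ definition above) =====
theorem count_low_high_spec : Claim_equal_count_low_high := by
  intro num_list _
  show count_low_high num_list = count_low_high_alt num_list
  unfold count_low_high count_low_high_alt
  split_ifs with h
  · rfl
  · rw [pvCountPair_eq, fold_pair_eq]
    simp
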